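-- pv_equiv track=rewrite | github.com/Lowgland/asientos_cine | cine_asientos.py | contar_asientos_libres_ocupados
-- ===== SOURCE A (Python) =====
-- def contar_asientos_libres_ocupados(matriz):
--     libre=0
--     ocupado=0
--     for fila in matriz:
--         for asiento in fila:
--             if asiento=="L":
--                 libre=libre+1
--             else:
--                 ocupado=ocupado+1
--     return libre, ocupado
-- ===== SOURCE B (Python) =====
-- def contar_asientos_libres_ocupados(matriz):
--     # divide-and-conquer over the row index range [lo, hi)
--     def go(lo, hi):
--         if lo >= hi:
--             return (0, 0)
--         if hi - lo == 1:
--             fila = matriz[lo]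
--             libres = fila.count("L")
--             return (libres, len(fila) - libres)
--         mid = (lo + hi) // 2
--         l1, o1 = go(lo, mid)
--         l2, o2 = go(mid, hi)
--         return (l1 + l2, o1 + o2)
--     return go(0, len(matriz))
-- ===== Notes on version B (the rewrite author's own statement) =====
-- stated objective: alternative
-- what changed: B counts by divide-and-conquer: it binary-splits the row index range, counts each single row at the leaf with fila.count('L') and len, and combines the (free, occupied) pairs additively, instead of A's nested left-to-right loop with two branch-incremented accumulators.
import Mathlib
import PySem

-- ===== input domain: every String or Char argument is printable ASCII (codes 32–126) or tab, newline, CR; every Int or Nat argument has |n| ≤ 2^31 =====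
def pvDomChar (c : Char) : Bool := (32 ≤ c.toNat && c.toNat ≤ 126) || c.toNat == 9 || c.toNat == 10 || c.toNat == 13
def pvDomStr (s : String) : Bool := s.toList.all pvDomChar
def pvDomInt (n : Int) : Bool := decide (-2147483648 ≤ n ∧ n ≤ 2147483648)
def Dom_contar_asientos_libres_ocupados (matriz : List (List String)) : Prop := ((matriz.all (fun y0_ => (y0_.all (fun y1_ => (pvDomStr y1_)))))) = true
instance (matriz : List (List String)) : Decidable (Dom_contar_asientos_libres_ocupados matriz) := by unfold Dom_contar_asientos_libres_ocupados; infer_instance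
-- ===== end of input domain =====

-- B replaces A's nested branch-counting loop by a divide-and-conquer recursion over the
-- row index range that combines per-row (free, occupied) pairs; objective: alternative.

-- ===== PORT A =====
-- nested loop with two accumulators (libre, ocupado), branch per seat
def contar_asientos_libres_ocupados (matriz : List (List String)) : Int × Int :=
  matriz.foldl
    (fun st fila =>
      fila.foldl
        (fun (st : Int × Int) asiento =>
          if asiento = "L" then (st.1 + 1, st.2) else (st.1, st.2 + 1))
        st)
    (0, 0)

-- ===== PORT B =====
-- go lo hi: B's inner divide-and-conquer helper on the row range [lo, hi)
-- (matriz[lo] is only reached with lo < hi ≤ len(matriz), so getD is exact there)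
def pvGoB (matriz : List (List String)) (lo hi : Nat) : Int × Int :=
  if lo ≥ hi then (0, 0)
  else if hi - lo = 1 then
    let fila := matriz.getD lo []
    let libres : Int := PySem.List.count fila "L"
    (libres, (fila.length : Int) - libres)
  else
    let mid := (lo + hi) / 2
    let p1 := pvGoB matriz lo mid
    let p2 := pvGoB matriz mid hi
    (p1.1 + p2.1, p1.2 + p2.2)
termination_by hi - lo
decreasing_by all_goals omega

def contar_asientos_libres_ocupados_alt (matriz : List (List String)) : Int × Int :=
  pvGoB matriz 0 matriz.length

-- ===== PRECONDITION & SPEC =====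
def Spec_contar_asientos_libres_ocupados (matriz : List (List String)) (out : Int × Int) : Prop := out = contar_asientos_libres_ocupados_alt matriz
instance (matriz : List (List String)) (out : Int × Int) : Decidable (Spec_contar_asientos_libres_ocupados matriz out) := by unfold Spec_contar_asientos_libres_ocupados; infer_instance

-- ===== CLAIM (what is proved, stated in full; the proofs are below) =====
def Claim_equal_contar_asientos_libres_ocupados : Prop := ∀ (matriz : List (List String)), Dom_contar_asientos_libres_ocupados matriz → Spec_contar_asientos_libres_ocupados matriz (contar_asientos_libres_ocupados matriz)

-- ===== LEMMAS AND PROOFS =====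

-- (libre, ocupado) tally of a list of rows, stated as two mapped sums
def pvRowsTally (rows : List (List String)) : Int × Int :=
  ((rows.map (fun fila => (PySem.List.count fila "L" : Int))).sum,
   (rows.map (fun fila => ((fila.length : Int) - PySem.List.count fila "L"))).sum)

lemma pvRowsTally_append (xs ys : List (List String)) :
    pvRowsTally (xs ++ ys)
      = ((pvRowsTally xs).1 + (pvRowsTally ys).1, (pvRowsTally xs).2 + (pvRowsTally ys).2) := by
  simp [pvRowsTally]

-- inner loop of A on one row, from an arbitrary start state
lemma fila_foldl (fila : List String) (a b : Int) :
    fila.foldl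
      (fun (st : Int × Int) asiento =>
        if asiento = "L" then (st.1 + 1, st.2) else (st.1, st.2 + 1))
      (a, b)
    = (a + PySem.List.count fila "L",
       b + ((fila.length : Int) - PySem.List.count fila "L")) := by
  induction fila generalizing a b with
  | nil => simp [PySem.List.count]
  | cons x xs ih =>
      simp only [List.foldl_cons]
      by_cases h : x = "L" <;>
        simp [h, ih, PySem.List.count] <;> ring_nf

-- A's outer loop computes the tally
lemma outer_foldl (matriz : List (List String)) (a b : Int) :
    matriz.foldl
      (fun st fila =>
        fila.foldl
          (fun (st : Int × Int) asiento =>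
            if asiento = "L" then (st.1 + 1, st.2) else (st.1, st.2 + 1))
          st)
      (a, b)
    = (a + (pvRowsTally matriz).1, b + (pvRowsTally matriz).2) := by
  induction matriz generalizing a b with
  | nil => simp [pvRowsTally]
  | cons fila rest ih =>
      simp only [List.foldl_cons, fila_foldl, ih, pvRowsTally, List.map_cons, List.sum_cons]
      exact Prod.ext (by ring) (by ring)

-- B's divide-and-conquer computes the tally of the row slice [lo, hi)
lemma pvGoB_eq_tally (matriz : List (List String)) :
    ∀ n lo hi, hi - lo = n →
      pvGoB matriz lo hi = pvRowsTally ((matriz.drop lo).take (hi - lo)) := by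
  intro n
  induction n using Nat.strong_induction_on with
  | _ n ih =>
    intro lo hi hn
    subst hn
    rw [pvGoB]
    by_cases hle : lo ≥ hi
    · simp [hle, show hi - lo = 0 by omega, pvRowsTally]
    · by_cases h1 : hi - lo = 1
      · simp only [hle, if_false, h1, if_true]
        by_cases hlt : lo < matriz.length
        · have hcons : matriz.drop lo = matriz[lo] :: matriz.drop (lo + 1) :=
            List.drop_eq_getElem_cons hlt
          have hg : matriz.getD lo [] = matriz[lo] := List.getD_eq_getElem _ _ hlt
          have ht : (matriz.drop lo).take 1 = [matriz[lo]] := by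
            rw [hcons]; rfl
          rw [hg, ht]
          simp [pvRowsTally]
        · have hd : matriz.drop lo = [] := by
            rw [List.drop_eq_nil_iff]; omega
          have hg : matriz.getD lo [] = [] := by
            rw [List.getD_eq_getElem?_getD,
                List.getElem?_eq_none (by omega : matriz.length ≤ lo)]
            rfl
          rw [hd, hg]
          simp [pvRowsTally, PySem.List.count]
      · simp only [hle, if_false, h1, if_false]
        have hm1 : lo < (lo + hi) / 2 := by omega
        have hm2 : (lo + hi) / 2 < hi := by omega
        rw [ih ((lo + hi) / 2 - lo) (by omega) lo ((lo + hi) / 2) rfl,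
            ih (hi - (lo + hi) / 2) (by omega) ((lo + hi) / 2) hi rfl]
        have hdd : matriz.drop ((lo + hi) / 2)
            = (matriz.drop lo).drop ((lo + hi) / 2 - lo) := by
          rw [List.drop_drop]
          congr 1
          omega
        have hsplit : (matriz.drop lo).take (hi - lo)
            = (matriz.drop lo).take ((lo + hi) / 2 - lo)
              ++ (matriz.drop ((lo + hi) / 2)).take (hi - (lo + hi) / 2) := by
          rw [hdd, ← List.take_add,
              show ((lo + hi) / 2 - lo) + (hi - (lo + hi) / 2) = hi - lo by omega]
        rw [hsplit, pvRowsTally_append]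

-- ===== VERDICT (by name: the statement is the Claim_ definition above) =====
theorem contar_asientos_libres_ocupados_spec : Claim_equal_contar_asientos_libres_ocupados := by
  intro matriz _
  unfold Spec_contar_asientos_libres_ocupados contar_asientos_libres_ocupados
    contar_asientos_libres_ocupados_alt
  rw [outer_foldl, pvGoB_eq_tally matriz (matriz.length - 0) 0 matriz.length rfl]
  simp
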